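-- pv_equiv track=rewrite | github.com/Patel-Hetu/Python_Ques | c5_W23.py | enumerate2
-- ===== SOURCE A (Python) =====
-- def enumerate2(N) :
--     '''
--     Assume that N is a positive integer.
--     Return the count of positive and even integers, that divide N with no remainder.
--
--     For example, enumerate2(8) returns 3
--     since 1, 2, 4, 8 divide into 8 with no remainder, but only 2, 4 and 8 are even.
--     '''
--     lst=[]
--     for i in range(1,N+1):
--         if N%i==0:
--             if i%2==0:
--                 lst.append(i)
--         else:
--             continue
--
--     return len(lst)
-- ===== SOURCE B (Python) =====
-- def enumerate2(N):
--     """Count positive even divisors of N by scanning divisor pairs up to sqrt(N)."""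
--     count = 0
--     i = 1
--     while i * i <= N:
--         if N % i == 0:
--             j = N // i
--             if i % 2 == 0:
--                 count += 1
--             if j != i and j % 2 == 0:
--                 count += 1
--         i += 1
--     return count
-- ===== Notes on version B (the rewrite author's own statement) =====
-- stated objective: faster
-- what changed: B enumerates divisors only up to sqrt(N), counting each divisor pair (i, N//i) at once, instead of A's full scan of 1..N with a list of matches.
import Mathlib
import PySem

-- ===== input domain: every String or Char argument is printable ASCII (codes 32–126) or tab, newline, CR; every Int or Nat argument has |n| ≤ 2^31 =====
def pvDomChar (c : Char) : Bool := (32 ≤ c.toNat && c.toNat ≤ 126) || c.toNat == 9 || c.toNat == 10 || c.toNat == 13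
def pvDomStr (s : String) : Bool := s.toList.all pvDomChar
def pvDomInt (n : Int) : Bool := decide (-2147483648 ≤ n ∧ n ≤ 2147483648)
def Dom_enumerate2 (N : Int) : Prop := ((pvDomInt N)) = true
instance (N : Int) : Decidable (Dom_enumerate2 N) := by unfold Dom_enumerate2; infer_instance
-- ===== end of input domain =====

-- B counts divisor pairs (i, N//i) for i up to sqrt(N) instead of A's scan of all of 1..N.

-- ===== PORT A =====
def enumerate2 (N : Int) : Int :=
  let lst : List Int :=
    (PySem.List.pyRange 1 (N + 1) 1).foldl
      (fun lst i =>
        if PySem.Int.mod N i = 0 then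
          (if PySem.Int.mod i 2 = 0 then lst ++ [i] else lst)
        else lst)
      []
  (lst.length : Int)

-- ===== PORT B =====
def altLoop (N i count : Int) : Int :=
  if h : i * i ≤ N then
    altLoop N (i + 1)
      (if PySem.Int.mod N i = 0 then
        let j := PySem.Int.floordiv N i
        let c := if PySem.Int.mod i 2 = 0 then count + 1 else count
        if j ≠ i ∧ PySem.Int.mod j 2 = 0 then c + 1 else c
      else count)
  else count
termination_by (N + 1 - i).toNat
decreasing_by
  have hiN : i ≤ N := by nlinarith [sq_nonneg (i - 1), sq_nonneg i]
  omega

def enumerate2_alt (N : Int) : Int := altLoop N 1 0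

-- ===== PRECONDITION & SPEC =====
def Spec_enumerate2 (N : Int) (out : Int) : Prop := out = enumerate2_alt N
instance (N : Int) (out : Int) : Decidable (Spec_enumerate2 N out) := by unfold Spec_enumerate2; infer_instance

-- ===== CLAIM (what is proved, stated in full; the proofs are below) =====
def Claim_equal_enumerate2 : Prop := ∀ (N : Int), Dom_enumerate2 N → Spec_enumerate2 N (enumerate2 N)

-- ===== LEMMAS AND PROOFS =====

/-- The set of positive even divisors of `N` (as A enumerates them). -/
def pvS (N : Int) : Finset ℤ :=
  ((PySem.List.pyRange 1 (N + 1) 1).filter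
    (fun d => decide (PySem.Int.mod N d = 0) && decide (PySem.Int.mod d 2 = 0))).toFinset

/-- Members of `pvS N` not yet counted when B's loop variable is `i`. -/
def pvT (N i : Int) : Finset ℤ := (pvS N).filter (fun d => i ≤ d ∧ i ≤ N / d)

lemma mem_pvS {N d : Int} : d ∈ pvS N ↔ 1 ≤ d ∧ d ≤ N ∧ d ∣ N ∧ 2 ∣ d := by
  simp [pvS, PySem.List.mem_pyRange_one, PySem.Int.mod_eq_zero_iff_dvd, and_assoc]

lemma mem_pvT {N i d : Int} :
    d ∈ pvT N i ↔ (1 ≤ d ∧ d ≤ N ∧ d ∣ N ∧ 2 ∣ d) ∧ i ≤ d ∧ i ≤ N / d := by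
  simp [pvT, Finset.mem_filter, mem_pvS]

lemma foldA (N : Int) (l : List Int) (acc : List Int) :
    l.foldl
      (fun lst i =>
        if PySem.Int.mod N i = 0 then
          (if PySem.Int.mod i 2 = 0 then lst ++ [i] else lst)
        else lst)
      acc
    = acc ++ l.filter (fun i => decide (PySem.Int.mod N i = 0) && decide (PySem.Int.mod i 2 = 0)) := by
  induction l generalizing acc with
  | nil => simp
  | cons x xs ih =>
    simp only [List.foldl_cons, List.filter_cons]
    by_cases h1 : PySem.Int.mod N x = 0 <;> by_cases h2 : PySem.Int.mod x 2 = 0 <;>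
      simp only [h1, h2, decide_true, decide_false, Bool.and_true, Bool.and_false,
        if_true, if_false, ih] <;>
      simp

lemma A_eq_card (N : Int) : enumerate2 N = ((pvS N).card : Int) := by
  unfold enumerate2
  rw [foldA]
  have hnd : ((PySem.List.pyRange 1 (N + 1) 1).filter
      (fun d => decide (PySem.Int.mod N d = 0) && decide (PySem.Int.mod d 2 = 0))).Nodup :=
    List.Nodup.filter _ (PySem.List.nodup_pyRange_one 1 (N + 1))
  unfold pvS
  rw [List.toFinset_card_of_nodup hnd]
  simp

lemma pvT_empty (N i : Int) (hi : 1 ≤ i) (h : N < i * i) : pvT N i = ∅ := by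
  rw [Finset.eq_empty_iff_forall_notMem]
  intro d hd
  rw [mem_pvT] at hd
  obtain ⟨⟨hd1, hdN, hdvd, _⟩, hid, hidiv⟩ := hd
  have hmul : d * (N / d) = N := by
    rw [mul_comm]; exact Int.ediv_mul_cancel hdvd
  have : i * i ≤ d * (N / d) :=
    mul_le_mul hid hidiv (by omega) (by omega)
  omega

lemma pvT_step_nondvd (N i : Int) (hi : 1 ≤ i) (h : PySem.Int.mod N i ≠ 0) :
    pvT N (i + 1) = pvT N i := by
  have hni : ¬ (i ∣ N) := fun hh => h ((PySem.Int.mod_eq_zero_iff_dvd N i).mpr hh)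
  ext d
  rw [mem_pvT, mem_pvT]
  constructor
  · rintro ⟨hs, h1, h2⟩
    exact ⟨hs, by omega, by omega⟩
  · rintro ⟨⟨hd1, hdN, hdvd, he⟩, hid, hidiv⟩
    refine ⟨⟨hd1, hdN, hdvd, he⟩, ?_, ?_⟩
    · have : d ≠ i := fun hdi => hni (hdi ▸ hdvd)
      omega
    · have hmul : d * (N / d) = N := by rw [mul_comm]; exact Int.ediv_mul_cancel hdvd
      have : N / d ≠ i := fun hq => hni ⟨d, by rw [← hmul, hq, mul_comm]⟩
      omega

lemma pvT_step_dvd (N i : Int) (hi : 1 ≤ i) (hii : i * i ≤ N) (h : PySem.Int.mod N i = 0) :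
    ((pvT N i).card : Int)
      = ((pvT N (i + 1)).card : Int)
        + (if PySem.Int.mod i 2 = 0 then 1 else 0)
        + (if PySem.Int.floordiv N i ≠ i ∧ PySem.Int.mod (PySem.Int.floordiv N i) 2 = 0 then 1 else 0) := by
  have hipos : 0 < i := by omega
  have hdvd : i ∣ N := (PySem.Int.mod_eq_zero_iff_dvd N i).mp h
  have hfd : PySem.Int.floordiv N i = N / i := PySem.Int.floordiv_eq_ediv_of_pos hipos
  set j : Int := N / i with hj
  have hij : i * j = N := Int.mul_ediv_cancel' hdvd
  have hile_j : i ≤ j := le_of_mul_le_mul_left (by rw [hij]; exact hii) hipos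
  have hj1 : 1 ≤ j := by omega
  have hjN : j ≤ N := by nlinarith
  have hjdvd : j ∣ N := ⟨i, by rw [← hij]; ring⟩
  have hjne : j ≠ 0 := by omega
  have hNj : N / j = i := by
    rw [← hij, mul_comm, Int.mul_ediv_cancel_left _ hjne]
  have hEm : ∀ d : Int, d ∈ ({i, j} : Finset ℤ).filter (fun d => 2 ∣ d) ↔
      ((d = i ∨ d = j) ∧ 2 ∣ d) := by
    intro d; simp [Finset.mem_filter]
  have hsplit : pvT N i = pvT N (i + 1) ∪ ({i, j} : Finset ℤ).filter (fun d => 2 ∣ d) := by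
    ext d
    rw [Finset.mem_union, mem_pvT, mem_pvT, hEm]
    constructor
    · rintro ⟨⟨hd1, hdN, hddvd, he⟩, hid, hidiv⟩
      by_cases hdi : d = i
      · exact Or.inr ⟨Or.inl hdi, he⟩
      · by_cases hdj : N / d = i
        · have hmul : d * (N / d) = N := by rw [mul_comm]; exact Int.ediv_mul_cancel hddvd
          have : d = j := by
            have : i * d = i * j := by rw [hij, ← hmul, hdj]; ring
            exact mul_left_cancel₀ (by omega) this
          exact Or.inr ⟨Or.inr this, he⟩
        · exact Or.inl ⟨⟨hd1, hdN, hddvd, he⟩, by omega, by omega⟩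
    · rintro (⟨hs, h1, h2⟩ | ⟨hd, he⟩)
      · exact ⟨hs, by omega, by omega⟩
      · rcases hd with hd | hd <;> subst hd
        · exact ⟨⟨by omega, by omega, hdvd, he⟩, le_refl _, by rw [← hj]; omega⟩
        · exact ⟨⟨by omega, by omega, hjdvd, he⟩, by omega, by rw [hNj]⟩
  have hdisj : Disjoint (pvT N (i + 1)) (({i, j} : Finset ℤ).filter (fun d => 2 ∣ d)) := by
    rw [Finset.disjoint_right]
    intro d hdE hdT
    rw [hEm] at hdE
    rw [mem_pvT] at hdT
    obtain ⟨⟨_, _, hddvd, _⟩, h1, h2⟩ := hdT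
    rcases hdE.1 with hd | hd <;> subst hd
    · omega
    · rw [hNj] at h2; omega
  have hcard : (pvT N i).card
      = (pvT N (i + 1)).card + (({i, j} : Finset ℤ).filter (fun d => 2 ∣ d)).card := by
    rw [hsplit, Finset.card_union_of_disjoint hdisj]
  have hmod2 : ∀ x : Int, (PySem.Int.mod x 2 = 0) ↔ 2 ∣ x :=
    fun x => PySem.Int.mod_eq_zero_iff_dvd x 2
  rw [hcard, hfd]
  push_cast
  by_cases hji : j = i
  · have hset : ({i, j} : Finset ℤ) = {i} := by rw [hji]; simp
    rw [hset]
    by_cases hei : (2:Int) ∣ i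
    · simp [Finset.filter_singleton, hei, if_pos ((hmod2 i).mpr hei), hji]
    · simp [Finset.filter_singleton, hei, if_neg (fun hc => hei ((hmod2 i).mp hc)), hji]
  · have hii' : i ∉ ({j} : Finset ℤ) := by simp [Ne.symm hji]
    by_cases hei : (2:Int) ∣ i <;> by_cases hej : (2:Int) ∣ j <;>
      simp [Finset.filter_insert, Finset.filter_singleton, hei, hej, hji,
        Finset.card_insert_of_notMem, Ne.symm hji, hmod2] <;> ring

lemma loop_inv (N : Int) :
    ∀ (k : Nat) (i count : Int), (N + 1 - i).toNat = k → 1 ≤ i →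
      altLoop N i count = count + ((pvT N i).card : Int) := by
  intro k
  induction k using Nat.strong_induction_on with
  | _ k ih =>
    intro i count hk hi
    rw [altLoop]
    by_cases hcond : i * i ≤ N
    · rw [dif_pos hcond]
      have hiN : i ≤ N := by nlinarith [sq_nonneg (i - 1), sq_nonneg i]
      rw [ih (N + 1 - (i + 1)).toNat (by omega) (i + 1) _ rfl (by omega)]
      by_cases hdv : PySem.Int.mod N i = 0
      · rw [if_pos hdv]
        have hstep := pvT_step_dvd N i hi hcond hdv
        simp only []
        rw [hstep]
        split_ifs <;> ring
      · rw [if_neg hdv, pvT_step_nondvd N i hi hdv]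
    · rw [dif_neg hcond]
      rw [pvT_empty N i hi (by omega)]
      simp

lemma pvT_one (N : Int) : pvT N 1 = pvS N := by
  ext d
  rw [mem_pvT, mem_pvS]
  constructor
  · exact fun h => h.1
  · rintro ⟨hd1, hdN, hdvd, he⟩
    refine ⟨⟨hd1, hdN, hdvd, he⟩, hd1, ?_⟩
    rw [Int.le_ediv_iff_mul_le (by omega : (0:Int) < d)]
    omega

-- ===== VERDICT (by name: the statement is the Claim_ definition above) =====
theorem enumerate2_spec : Claim_equal_enumerate2 := by
  intro N _
  unfold Spec_enumerate2 enumerate2_alt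
  rw [A_eq_card, loop_inv N (N + 1 - 1).toNat 1 0 rfl (by omega), pvT_one]
  ring
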